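-- pv_equiv track=rewrite | github.com/DevRoss/python-offer-code | offer/13_RobotMove.py | compute_digit
-- ===== SOURCE A (Python) =====
-- def compute_digit(row, col):
--     ret = 0
--     while row > 0:
--         ret += row % 10
--         row //= 10
--
--     while col > 0:
--         ret += col % 10
--         col //= 10
--     return ret
-- ===== SOURCE B (Python) =====
-- def compute_digit(row, col):
--     r = sum(int(d) for d in str(row)) if row > 0 else 0
--     c = sum(int(d) for d in str(col)) if col > 0 else 0
--     return r + c
-- ===== Notes on version B (the rewrite author's own statement) =====
-- stated objective: idiomatic
-- what changed: Replaces the two arithmetic %10 // 10 digit-peeling while-loops with string-based digit summation: each positive argument is rendered with str() and its decimal characters are summed.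
import Mathlib
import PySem

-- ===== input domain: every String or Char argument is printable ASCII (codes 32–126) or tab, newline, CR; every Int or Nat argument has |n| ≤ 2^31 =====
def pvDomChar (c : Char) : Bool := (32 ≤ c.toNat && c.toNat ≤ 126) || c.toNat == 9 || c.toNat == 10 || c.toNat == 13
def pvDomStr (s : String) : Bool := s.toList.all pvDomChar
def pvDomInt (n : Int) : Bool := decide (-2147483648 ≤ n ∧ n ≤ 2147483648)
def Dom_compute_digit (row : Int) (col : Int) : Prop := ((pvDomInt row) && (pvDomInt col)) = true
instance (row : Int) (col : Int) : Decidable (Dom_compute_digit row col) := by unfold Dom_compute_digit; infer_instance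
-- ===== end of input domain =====

-- B replaces the arithmetic digit-peeling loops with string-based digit summation (idiomatic; same cost).


-- ===== PORT A =====
-- one 'while n > 0: ret += n % 10; n //= 10' loop, over the accumulator ret
def pvDigitLoop (ret : Int) (n : Int) : Int :=
  if _h : n > 0 then pvDigitLoop (ret + PySem.Int.mod n 10) (PySem.Int.floordiv n 10) else ret
termination_by n.toNat
decreasing_by
  simp only [PySem.Int.floordiv, Int.fdiv_eq_ediv]
  omega

def compute_digit (row : Int) (col : Int) : Int :=
  pvDigitLoop (pvDigitLoop 0 row) col

-- ===== PORT B =====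
-- sum(int(d) for d in str(n)) if n > 0 else 0; for n > 0 every character of str(n) is a
-- decimal digit, on which int(d) is exactly its code point minus 48.
def pvStrDigitSum (n : Int) : Int :=
  if n > 0 then ((PySem.Int.toStr n).toList.map (fun c => ((c.toNat : Int) - 48))).sum else 0

def compute_digit_alt (row : Int) (col : Int) : Int :=
  pvStrDigitSum row + pvStrDigitSum col

-- ===== PRECONDITION & SPEC =====
def Spec_compute_digit (row : Int) (col : Int) (out : Int) : Prop := out = compute_digit_alt row col
instance (row : Int) (col : Int) (out : Int) : Decidable (Spec_compute_digit row col out) := by unfold Spec_compute_digit; infer_instance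

-- ===== CLAIM (what is proved, stated in full; the proofs are below) =====
def Claim_equal_compute_digit : Prop := ∀ (row : Int) (col : Int), Dom_compute_digit row col → Spec_compute_digit row col (compute_digit row col)

-- ===== LEMMAS AND PROOFS =====

-- arithmetic digit sum of a natural number
def pvDsum (m : Nat) : Int :=
  if m = 0 then 0 else (m % 10 : Nat) + pvDsum (m / 10)
decreasing_by exact Nat.div_lt_self (by omega) (by omega)

theorem pvDigitLoop_nonpos (ret n : Int) (h : ¬ n > 0) : pvDigitLoop ret n = ret := by
  unfold pvDigitLoop; simp [h]

theorem pvDigitLoop_eq (m : Nat) : ∀ ret : Int, pvDigitLoop ret (m : Int) = ret + pvDsum m := by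
  induction m using Nat.strong_induction_on with
  | _ m ih =>
    intro ret
    unfold pvDigitLoop
    rw [pvDsum]
    by_cases h : m = 0
    · simp [h]
    · have hpos : (m : Int) > 0 := by omega
      simp only [hpos, dif_pos, if_neg h]
      have hmod : PySem.Int.mod (m : Int) 10 = ((m % 10 : Nat) : Int) := by
        rw [PySem.Int.mod, Int.fmod_eq_emod,
          if_pos (Or.inl (by norm_num) : (0:Int) ≤ 10 ∨ (10:Int) ∣ (m:Int))]
        omega
      have hdiv : PySem.Int.floordiv (m : Int) 10 = ((m / 10 : Nat) : Int) := by
        rw [PySem.Int.floordiv, Int.fdiv_eq_ediv,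
          if_pos (Or.inl (by norm_num) : (0:Int) ≤ 10 ∨ (10:Int) ∣ (m:Int))]
        omega
      rw [hmod, hdiv, ih (m / 10) (Nat.div_lt_self (by omega) (by omega))]
      ring

theorem pvCharSum_digitChar (d : Nat) (h : d < 10) :
    ((Nat.digitChar d).toNat : Int) - 48 = (d : Int) := by
  interval_cases d <;> decide

-- string digit sum over toDigitsCore equals the arithmetic digit sum
theorem pvToDigitsCore_sum (fuel : Nat) : ∀ (m : Nat) (ds : List Char), m < fuel →
    ((Nat.toDigitsCore 10 fuel m ds).map (fun c => ((c.toNat : Int) - 48))).sum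
      = pvDsum m + ((ds).map (fun c => ((c.toNat : Int) - 48))).sum := by
  induction fuel with
  | zero => intro m ds h; omega
  | succ fuel ih =>
    intro m ds h
    rw [Nat.toDigitsCore]
    have hd := pvCharSum_digitChar (m % 10) (Nat.mod_lt _ (by omega))
    by_cases hq : m / 10 = 0
    · rw [if_pos hq]
      have hsmall : pvDsum m = ((m % 10 : Nat) : Int) := by
        rw [pvDsum]
        by_cases h0 : m = 0
        · simp [h0]
        · rw [if_neg h0, hq, pvDsum]
          simp
      simp only [List.map_cons, List.sum_cons, hd, hsmall]
    · rw [if_neg hq]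
      rw [ih (m / 10) _ (by
        have := Nat.div_lt_self (show 0 < m by omega) (show 1 < 10 by omega)
        omega)]
      conv_rhs => rw [pvDsum]
      rw [if_neg (show ¬ m = 0 by omega)]
      simp only [List.map_cons, List.sum_cons, hd]
      ring

theorem pvStrDigitSum_eq (n : Int) : pvStrDigitSum n = pvDigitLoop 0 n := by
  unfold pvStrDigitSum
  by_cases h : n > 0
  · have hn : n = (n.toNat : Int) := by omega
    rw [if_pos h, PySem.Int.toList_toStr, PySem.Int.toChars, if_neg (show ¬ n < 0 by omega),
      Nat.toDigits, pvToDigitsCore_sum (n.toNat + 1) n.toNat [] (by omega)]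
    conv_rhs => rw [hn]
    rw [pvDigitLoop_eq]
    simp
  · rw [if_neg h, pvDigitLoop_nonpos 0 n h]

theorem pvDigitLoop_shift (ret n : Int) : pvDigitLoop ret n = ret + pvDigitLoop 0 n := by
  by_cases h : n > 0
  · have hn : n = (n.toNat : Int) := by omega
    rw [hn, pvDigitLoop_eq, pvDigitLoop_eq]
    ring
  · rw [pvDigitLoop_nonpos ret n h, pvDigitLoop_nonpos 0 n h]
    ring

-- ===== VERDICT (by name: the statement is the Claim_ definition above) =====
theorem compute_digit_spec : Claim_equal_compute_digit := by
  intro row col _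
  unfold Spec_compute_digit compute_digit compute_digit_alt
  rw [pvStrDigitSum_eq, pvStrDigitSum_eq, pvDigitLoop_shift (pvDigitLoop 0 row) col]
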